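-- pv_equiv track=rewrite | github.com/stalj/pp1 | 04-Subroutines/learning/zad2.py | f
-- ===== SOURCE A (Python) =====
-- def f(binary_number):
--     count=0
--     t='01'
--     for i in binary_number:
--         if i not in t:
--             count=1
--             break
--         else:
--             pass
--     if count!=0:
--         return (False)
--     else:
--         return (True)
-- ===== SOURCE B (Python) =====
-- def f(binary_number):
--     return binary_number.replace('0', '').replace('1', '') == ''
-- ===== Notes on version B (the rewrite author's own statement) =====
-- stated objective: simpler
-- what changed: Replaces A's per-character membership loop with break flag by two staged deletion passes (replace '0' then '1' by the empty string) followed by an emptiness test.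
import Mathlib
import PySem

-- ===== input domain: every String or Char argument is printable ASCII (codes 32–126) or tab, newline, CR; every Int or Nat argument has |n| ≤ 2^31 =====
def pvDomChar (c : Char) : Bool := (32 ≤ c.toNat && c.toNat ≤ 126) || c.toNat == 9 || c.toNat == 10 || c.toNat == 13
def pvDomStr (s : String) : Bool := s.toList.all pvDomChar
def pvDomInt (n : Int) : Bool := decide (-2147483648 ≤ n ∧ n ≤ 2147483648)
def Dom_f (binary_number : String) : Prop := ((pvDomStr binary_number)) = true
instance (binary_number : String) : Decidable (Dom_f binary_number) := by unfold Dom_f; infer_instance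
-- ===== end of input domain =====

-- B replaces A's per-character loop with a break flag by two staged deletion passes
-- (replace '0', then '1', by the empty string) plus an emptiness test (same cost, simpler).
-- ===== PORT A =====
-- the for-loop with break: count becomes 1 and the loop stops at the first char not in '01'
def fCount : List Char -> Int
  | [] => 0
  | c :: cs => if !(c == '0' || c == '1') then 1 else fCount cs

def f (binary_number : String) : Bool :=
  let count := fCount binary_number.toList
  if count != 0 then false else true

-- ===== PORT B =====
def f_alt (binary_number : String) : Bool :=
  PySem.Str.replace (PySem.Str.replace binary_number "0" "") "1" "" == ""

-- ===== PRECONDITION & SPEC =====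
def Spec_f (binary_number : String) (out : Bool) : Prop := out = f_alt binary_number
instance (binary_number : String) (out : Bool) : Decidable (Spec_f binary_number out) := by unfold Spec_f; infer_instance

-- ===== CLAIM (what is proved, stated in full; the proofs are below) =====
def Claim_equal_f : Prop := ∀ (binary_number : String), Dom_f binary_number → Spec_f binary_number (f binary_number)

-- ===== LEMMAS AND PROOFS =====

lemma replace_go_single (ch : Char) (l acc : List Char) (fuel : Nat) (h : l.length ≤ fuel) :
    PySem.Chars.replace.go [ch] [] fuel l acc = acc.reverse ++ l.filter (fun c => !(c == ch)) := by
  induction l generalizing fuel acc with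
  | nil =>
    cases fuel with
    | zero => simp [PySem.Chars.replace.go]
    | succ n => simp [PySem.Chars.replace.go]
  | cons c t ih =>
    cases fuel with
    | zero => simp at h
    | succ n =>
      have hn : t.length ≤ n := by simpa using h
      rw [PySem.Chars.replace.go]
      by_cases hc : c = ch
      · subst hc
        simp [List.isPrefixOf, ih _ _ hn]
      · have : ([ch].isPrefixOf (c :: t)) = false := by
          simp [List.isPrefixOf, BEq.symm_false, hc]
        rw [this]
        simp only [Bool.false_eq_true, if_false]
        rw [ih _ _ hn]
        simp [hc]

lemma replace_single (ch : Char) (s : String) :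
    PySem.Str.replace s (String.ofList [ch]) "" = String.ofList (s.toList.filter (fun c => !(c == ch))) := by
  unfold PySem.Str.replace PySem.Chars.replace
  rw [if_neg (by simp)]
  rw [show (String.ofList [ch]).toList = [ch] from by simp, show ("" : String).toList = [] from rfl]
  rw [replace_go_single ch s.toList [] s.toList.length le_rfl]
  simp

lemma f_alt_eq_true_iff (s : String) :
    f_alt s = true ↔ ∀ c ∈ s.toList, c = '0' ∨ c = '1' := by
  unfold f_alt
  have h0 : ("0" : String) = String.ofList ['0'] := rfl
  have h1 : ("1" : String) = String.ofList ['1'] := rfl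
  rw [h0, h1, replace_single, replace_single]
  simp only [String.toList_ofList, List.filter_filter]
  rw [beq_iff_eq]
  constructor
  · intro h c hc
    have hnil : List.filter (fun a => !(a == '1') && !(a == '0')) s.toList = [] := by
      have h' := congrArg String.toList h
      simpa using h'
    by_contra hcon
    push Not at hcon
    have hm : c ∈ List.filter (fun a => !(a == '1') && !(a == '0')) s.toList := by
      simp [List.mem_filter, hc, hcon.1, hcon.2]
    rw [hnil] at hm
    simp at hm
  · intro h
    have : s.toList.filter (fun c => !(c == '1') && !(c == '0')) = [] := by
      rw [List.filter_eq_nil_iff]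
      intro c hc
      rcases h c hc with h' | h' <;> simp [h']
    rw [this]

lemma fCount_eq_zero_iff (l : List Char) : fCount l = 0 ↔ ∀ c ∈ l, c = '0' ∨ c = '1' := by
  induction l with
  | nil => simp [fCount]
  | cons c cs ih =>
    simp only [fCount, List.mem_cons]
    split_ifs with h
    · simp_all
    · simp_all
      intro _
      by_cases hc : c = '0'
      · exact Or.inl hc
      · exact Or.inr (h hc)

-- ===== VERDICT (by name: the statement is the Claim_ definition above) =====
theorem f_spec : Claim_equal_f := by
  intro s _
  unfold Spec_f f
  simp only [bne_iff_ne, ne_eq, ite_not]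
  by_cases h : fCount s.toList = 0
  · simp [h, Eq.symm ((f_alt_eq_true_iff s).2 ((fCount_eq_zero_iff _).1 h))]
  · simp only [if_neg h]
    cases hf : f_alt s with
    | false => rfl
    | true => exact absurd ((fCount_eq_zero_iff _).2 ((f_alt_eq_true_iff s).1 hf)) h
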